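-- pv_equiv track=rewrite | github.com/Dohanhub/DoganAILAp | scripts/resolve_conflicts.py | resolve_text
-- ===== SOURCE A (Python) =====
-- MARK_A = "<<<<<<< HEAD"
--
-- MARK_B = "======="
--
-- MARK_C = ">>>>>>>"
--
-- def resolve_text(text: str) -> str:
--     out_lines: list[str] = []
--     lines = text.splitlines()
--     i = 0
--     n = len(lines)
--     while i < n:
--         line = lines[i]
--         if line.startswith(MARK_A):
--             # collect head section until MARK_B, then skip until MARK_C
--             i += 1
--             head: list[str] = []
--             # capture head
--             while i < n and not lines[i].startswith(MARK_B) and not lines[i].startswith(MARK_C):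
--                 head.append(lines[i])
--                 i += 1
--             # skip separator if present
--             if i < n and lines[i].startswith(MARK_B):
--                 i += 1
--                 # skip bottom until MARK_C
--                 while i < n and not lines[i].startswith(MARK_C):
--                     i += 1
--             # skip closing marker if present
--             if i < n and lines[i].startswith(MARK_C):
--                 i += 1
--             out_lines.extend(head)
--             continue
--         else:
--             out_lines.append(line)
--             i += 1
--     # preserve trailing newline if original had it
--     return "\n".join(out_lines) + ("\n" if text.endswith("\n") else "")
-- ===== SOURCE B (Python) =====
-- MARK_A = "<<<<<<< HEAD"
--
-- MARK_B = "======="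
--
-- MARK_C = ">>>>>>>"
--
-- def resolve_text(text: str) -> str:
--     out: list[str] = []
--     state = "normal"
--     for line in text.splitlines():
--         if state == "normal":
--             if line.startswith(MARK_A):
--                 state = "head"
--             else:
--                 out.append(line)
--         elif state == "head":
--             if line.startswith(MARK_B):
--                 state = "skip"
--             elif line.startswith(MARK_C):
--                 state = "normal"
--             else:
--                 out.append(line)
--         else:  # skip
--             if line.startswith(MARK_C):
--                 state = "normal"
--     return "\n".join(out) + ("\n" if text.endswith("\n") else "")
-- ===== Notes on version B (the rewrite author's own statement) =====
-- stated objective: simpler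
-- what changed: Replaced A's nested while-loops over a shared index with a deferred head buffer by one flat per-line loop carrying a three-valued state (normal/head/skip) that appends kept lines directly.
import Mathlib
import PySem

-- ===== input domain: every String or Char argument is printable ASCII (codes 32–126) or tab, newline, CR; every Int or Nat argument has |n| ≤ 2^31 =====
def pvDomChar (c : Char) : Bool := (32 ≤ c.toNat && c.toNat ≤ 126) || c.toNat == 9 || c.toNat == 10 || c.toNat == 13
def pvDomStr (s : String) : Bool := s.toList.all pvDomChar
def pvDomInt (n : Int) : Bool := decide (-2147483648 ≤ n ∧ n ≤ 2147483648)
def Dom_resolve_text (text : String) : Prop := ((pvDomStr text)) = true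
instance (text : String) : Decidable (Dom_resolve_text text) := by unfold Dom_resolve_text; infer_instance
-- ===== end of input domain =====

-- B replaces A's nested while-loops over a shared index (with a deferred head buffer)
-- by one flat per-line loop carrying a three-valued state; objective: simpler. Same cost.

-- ===== PORT A =====
def pvStartsA (s : String) : Bool := PySem.Str.startswith s "<<<<<<< HEAD"
def pvStartsB (s : String) : Bool := PySem.Str.startswith s "======="
def pvStartsC (s : String) : Bool := PySem.Str.startswith s ">>>>>>>"

-- inner while: capture head until a line starts with MARK_B or MARK_C
def pvCapture (ls : List String) : List String × List String :=
  match ls with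
  | [] => ([], [])
  | l :: tl =>
    if pvStartsB l || pvStartsC l then ([], l :: tl)
    else
      let p := pvCapture tl
      (l :: p.1, p.2)

-- inner while: skip bottom until MARK_C
def pvSkipBottom (ls : List String) : List String :=
  match ls with
  | [] => []
  | l :: tl => if pvStartsC l then l :: tl else pvSkipBottom tl

-- "skip separator if present" (then skip bottom until MARK_C)
def pvAfterSep (r : List String) : List String :=
  match r with
  | [] => []
  | b :: tl => if pvStartsB b then pvSkipBottom tl else b :: tl

-- "skip closing marker if present"
def pvAfterClose (r : List String) : List String :=
  match r with
  | [] => []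
  | c :: tl => if pvStartsC c then tl else c :: tl

theorem pvCapture_len (ls : List String) : (pvCapture ls).2.length ≤ ls.length := by
  induction ls with
  | nil => simp [pvCapture]
  | cons l tl ih =>
    simp only [pvCapture]
    split
    · simp
    · simpa using Nat.le_succ_of_le ih

theorem pvSkipBottom_len (ls : List String) : (pvSkipBottom ls).length ≤ ls.length := by
  induction ls with
  | nil => simp [pvSkipBottom]
  | cons l tl ih =>
    simp only [pvSkipBottom]
    split
    · simp
    · simpa using Nat.le_succ_of_le ih

theorem pvAfterSep_len (r : List String) : (pvAfterSep r).length ≤ r.length := by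
  match r with
  | [] => simp [pvAfterSep]
  | b :: tl =>
    simp only [pvAfterSep]
    split
    · simpa using Nat.le_succ_of_le (pvSkipBottom_len tl)
    · simp

theorem pvAfterClose_len (r : List String) : (pvAfterClose r).length ≤ r.length := by
  match r with
  | [] => simp [pvAfterClose]
  | c :: tl =>
    simp only [pvAfterClose]
    split <;> simp

-- the outer while loop of A
def pvLoopA (ls : List String) : List String :=
  match ls with
  | [] => []
  | line :: rest =>
    if pvStartsA line then
      (pvCapture rest).1 ++ pvLoopA (pvAfterClose (pvAfterSep (pvCapture rest).2))
    else
      line :: pvLoopA rest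
termination_by ls.length
decreasing_by
  · have h1 := pvCapture_len rest
    have h2 := pvAfterSep_len (pvCapture rest).2
    have h3 := pvAfterClose_len (pvAfterSep (pvCapture rest).2)
    simp only [List.length_cons]
    omega
  · simp only [List.length_cons]
    omega

def resolve_text (text : String) : String :=
  PySem.Str.join "\n" (pvLoopA (PySem.Str.splitlines text)) ++
    (if PySem.Str.endswith text "\n" then "\n" else "")

-- ===== PORT B =====
-- state: 0 = "normal", 1 = "head", 2 = "skip"
def pvStepB (st : Nat × List String) (line : String) : Nat × List String :=
  if st.1 = 0 then
    if pvStartsA line then (1, st.2) else (0, st.2 ++ [line])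
  else if st.1 = 1 then
    if pvStartsB line then (2, st.2)
    else if pvStartsC line then (0, st.2)
    else (1, st.2 ++ [line])
  else
    if pvStartsC line then (0, st.2) else st

def resolve_text_alt (text : String) : String :=
  PySem.Str.join "\n" ((PySem.Str.splitlines text).foldl pvStepB (0, [])).2 ++
    (if PySem.Str.endswith text "\n" then "\n" else "")

-- ===== PRECONDITION & SPEC =====
def Spec_resolve_text (text : String) (out : String) : Prop := out = resolve_text_alt text
instance (text : String) (out : String) : Decidable (Spec_resolve_text text out) := by unfold Spec_resolve_text; infer_instance

-- ===== CLAIM (what is proved, stated in full; the proofs are below) =====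
def Claim_equal_resolve_text : Prop := ∀ (text : String), Dom_resolve_text text → Spec_resolve_text text (resolve_text text)

-- ===== LEMMAS AND PROOFS =====

-- B's state machine as a structural recursion (proof-side model of the foldl)
def pvGoB (s : Nat) (ls : List String) : List String :=
  match ls with
  | [] => []
  | l :: tl =>
    if s = 0 then
      if pvStartsA l then pvGoB 1 tl else l :: pvGoB 0 tl
    else if s = 1 then
      if pvStartsB l then pvGoB 2 tl
      else if pvStartsC l then pvGoB 0 tl
      else l :: pvGoB 1 tl
    else
      if pvStartsC l then pvGoB 0 tl else pvGoB s tl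

theorem pvFoldl_goB (ls : List String) (s : Nat) (acc : List String) :
    (ls.foldl pvStepB (s, acc)).2 = acc ++ pvGoB s ls := by
  induction ls generalizing s acc with
  | nil => simp [pvGoB]
  | cons l tl ih =>
    simp only [List.foldl_cons, pvGoB, pvStepB]
    split_ifs <;> simp [ih, List.append_assoc]

-- state 2 = A's "skip bottom until MARK_C, then skip the closing marker"
theorem pvGoB_two (ls : List String) :
    pvGoB 2 ls = pvGoB 0 (pvAfterClose (pvSkipBottom ls)) := by
  induction ls with
  | nil => simp [pvGoB, pvSkipBottom, pvAfterClose]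
  | cons l tl ih =>
    by_cases hc : pvStartsC l
    · have h1 : pvGoB 2 (l :: tl) = pvGoB 0 tl := by simp [pvGoB, hc]
      simp [pvSkipBottom, pvAfterClose, hc, h1]
    · have h1 : pvGoB 2 (l :: tl) = pvGoB 2 tl := by simp [pvGoB, hc]
      have h2 : pvSkipBottom (l :: tl) = pvSkipBottom tl := by simp [pvSkipBottom, hc]
      rw [h1, h2, ih]

-- state 1 = A's "capture head, skip separator+bottom, skip closing marker"
theorem pvGoB_one (ls : List String) :
    pvGoB 1 ls = (pvCapture ls).1 ++ pvGoB 0 (pvAfterClose (pvAfterSep (pvCapture ls).2)) := by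
  induction ls with
  | nil => simp [pvGoB, pvCapture, pvAfterSep, pvAfterClose]
  | cons l tl ih =>
    by_cases hb : pvStartsB l
    · have h1 : pvGoB 1 (l :: tl) = pvGoB 2 tl := by simp [pvGoB, hb]
      have h2 : pvCapture (l :: tl) = ([], l :: tl) := by simp [pvCapture, hb]
      rw [h1, h2]
      simpa [pvAfterSep, hb] using pvGoB_two tl
    · by_cases hc : pvStartsC l
      · have h1 : pvGoB 1 (l :: tl) = pvGoB 0 tl := by simp [pvGoB, hb, hc]
        have h2 : pvCapture (l :: tl) = ([], l :: tl) := by simp [pvCapture, hc]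
        rw [h1, h2]
        simp [pvAfterSep, pvAfterClose, hb, hc]
      · have h1 : pvGoB 1 (l :: tl) = l :: pvGoB 1 tl := by simp [pvGoB, hb, hc]
        have h2 : pvCapture (l :: tl) = (l :: (pvCapture tl).1, (pvCapture tl).2) := by
          simp [pvCapture, hb, hc]
        rw [h1, h2, ih]
        simp

theorem pvLoopA_eq_goB (ls : List String) : pvLoopA ls = pvGoB 0 ls := by
  induction hn : ls.length using Nat.strong_induction_on generalizing ls with
  | _ n ih =>
    match ls with
    | [] => simp [pvLoopA, pvGoB]
    | line :: rest =>
      by_cases ha : pvStartsA line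
      · have hA : pvLoopA (line :: rest) =
            (pvCapture rest).1 ++ pvLoopA (pvAfterClose (pvAfterSep (pvCapture rest).2)) := by
          rw [pvLoopA]; simp [ha]
        have hB : pvGoB 0 (line :: rest) = pvGoB 1 rest := by simp [pvGoB, ha]
        have hlen : (pvAfterClose (pvAfterSep (pvCapture rest).2)).length < n := by
          have h1 := pvCapture_len rest
          have h2 := pvAfterSep_len (pvCapture rest).2
          have h3 := pvAfterClose_len (pvAfterSep (pvCapture rest).2)
          subst hn
          simp only [List.length_cons]
          omega
        rw [hA, hB, pvGoB_one]
        rw [ih _ hlen _ rfl]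
      · have hA : pvLoopA (line :: rest) = line :: pvLoopA rest := by
          rw [pvLoopA]; simp [ha]
        have hB : pvGoB 0 (line :: rest) = line :: pvGoB 0 rest := by simp [pvGoB, ha]
        have hlen : rest.length < n := by subst hn; simp
        rw [hA, hB, ih _ hlen _ rfl]

-- ===== VERDICT (by name: the statement is the Claim_ definition above) =====
theorem resolve_text_spec : Claim_equal_resolve_text := by
  intro text _
  unfold Spec_resolve_text resolve_text resolve_text_alt
  rw [pvFoldl_goB, pvLoopA_eq_goB]
  simp
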